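-- pv_equiv track=rewrite | github.com/donaldson-lab/PREP | suffix_array.py | lce
-- ===== SOURCE A (Python) =====
-- def lce(string1, int1, string2, int2, mismatches):
--         res, mm = 0, 0
--         for i,j in zip(string1[int1:], string2[int2:]):
--             if i == j:
--                 res += 1
--             else:
--                 if mm < mismatches:
--                     mm += 1
--                     res += 1
--                 else:
--                     return res
--         return res
-- ===== SOURCE B (Python) =====
-- def lce(string1, int1, string2, int2, mismatches):
--     s1 = string1[int1:]
--     s2 = string2[int2:]
--     diffs = [i for i, (a, b) in enumerate(zip(s1, s2)) if a != b]
--     k = max(mismatches, 0)  # a non-positive budget behaves like budget 0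
--     return diffs[k] if k < len(diffs) else min(len(s1), len(s2))
-- ===== Notes on version B (the rewrite author's own statement) =====
-- stated objective: alternative
-- what changed: Replaces the stateful scan with a budget counter and early return by building the list of mismatch positions once and indexing it: the answer is the (budget+1)-th mismatch position if it exists, else the common length.
import Mathlib
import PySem

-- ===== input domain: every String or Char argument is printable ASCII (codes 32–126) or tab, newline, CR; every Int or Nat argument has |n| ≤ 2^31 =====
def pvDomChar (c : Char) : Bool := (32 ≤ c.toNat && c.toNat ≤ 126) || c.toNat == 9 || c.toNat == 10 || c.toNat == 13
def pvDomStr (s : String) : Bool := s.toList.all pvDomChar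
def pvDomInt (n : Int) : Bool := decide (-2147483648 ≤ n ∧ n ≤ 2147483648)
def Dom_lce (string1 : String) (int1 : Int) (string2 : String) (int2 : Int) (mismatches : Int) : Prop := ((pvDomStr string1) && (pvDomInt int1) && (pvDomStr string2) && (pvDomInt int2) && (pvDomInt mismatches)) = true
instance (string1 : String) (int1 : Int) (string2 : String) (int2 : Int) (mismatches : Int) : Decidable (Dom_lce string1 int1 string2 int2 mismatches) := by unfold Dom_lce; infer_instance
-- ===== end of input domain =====

-- B builds the list of mismatch positions once and indexes it, instead of A's
-- stateful scan with a budget counter and early return; same cost, alternative decomposition.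

-- ===== PORT A =====
-- the 'for i,j in zip(...)' loop with state res, mm and the early 'return res'
def lceLoop (pairs : List (Char × Char)) (mismatches res mm : Int) : Int :=
  match pairs with
  | [] => res
  | (i, j) :: rest =>
    if i = j then lceLoop rest mismatches (res + 1) mm
    else if mm < mismatches then lceLoop rest mismatches (res + 1) (mm + 1)
    else res

def lce (string1 : String) (int1 : Int) (string2 : String) (int2 : Int) (mismatches : Int) : Int :=
  lceLoop (List.zip (PySem.List.slice string1.toList (some int1) none)
                    (PySem.List.slice string2.toList (some int2) none)) mismatches 0 0

-- ===== PORT B =====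
def lce_alt (string1 : String) (int1 : Int) (string2 : String) (int2 : Int) (mismatches : Int) : Int :=
  let s1 := PySem.List.slice string1.toList (some int1) none
  let s2 := PySem.List.slice string2.toList (some int2) none
  let diffs := ((PySem.List.enumerate (List.zip s1 s2) 0).filter (fun p => p.2.1 ≠ p.2.2)).map (fun p => p.1)
  let k := max mismatches 0
  -- diffs[k]: k is nonnegative and in range in this branch, so pyGetD with default 0 is exact
  if k < (diffs.length : Int) then PySem.List.pyGetD diffs k 0
  else (min s1.length s2.length : Int)

-- ===== PRECONDITION & SPEC =====
def Spec_lce (string1 : String) (int1 : Int) (string2 : String) (int2 : Int) (mismatches : Int) (out : Int) : Prop := out = lce_alt string1 int1 string2 int2 mismatches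
instance (string1 : String) (int1 : Int) (string2 : String) (int2 : Int) (mismatches : Int) (out : Int) : Decidable (Spec_lce string1 int1 string2 int2 mismatches out) := by unfold Spec_lce; infer_instance

-- ===== CLAIM (what is proved, stated in full; the proofs are below) =====
def Claim_equal_lce : Prop := ∀ (string1 : String) (int1 : Int) (string2 : String) (int2 : Int) (mismatches : Int), Dom_lce string1 int1 string2 int2 mismatches → Spec_lce string1 int1 string2 int2 mismatches (lce string1 int1 string2 int2 mismatches)

-- ===== LEMMAS AND PROOFS =====

-- remaining extension length of the scan, parameterised by the remaining budget b
def lceG (pairs : List (Char × Char)) (b : Int) : Int :=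
  match pairs with
  | [] => 0
  | (i, j) :: rest =>
    if i = j then 1 + lceG rest b
    else if 0 < b then 1 + lceG rest (b - 1)
    else 0

-- the mismatch-index list of B, with enumeration starting at s
def diffsFrom (pairs : List (Char × Char)) (s : Int) : List Int :=
  ((PySem.List.enumerate pairs s).filter (fun p => p.2.1 ≠ p.2.2)).map (fun p => p.1)

lemma lceLoop_eq_lceG (pairs : List (Char × Char)) (m : Int) :
    ∀ res mm, lceLoop pairs m res mm = res + lceG pairs (m - mm) := by
  induction pairs with
  | nil => intro res mm; simp [lceLoop, lceG]
  | cons p rest ih =>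
    intro res mm
    obtain ⟨i, j⟩ := p
    by_cases h : i = j
    · simp [lceLoop, lceG, h, ih]; ring
    · by_cases hb : mm < m
      · have h1 : (0:Int) < m - mm := by omega
        have h2 : m - (mm + 1) = m - mm - 1 := by ring
        simp only [lceLoop, lceG, if_neg h, if_pos hb, if_pos h1, ih, h2]; ring
      · have h1 : ¬ (0:Int) < m - mm := by omega
        simp only [lceLoop, lceG, if_neg h, if_neg hb, if_neg h1]
        ring

lemma diffsFrom_nil (s : Int) : diffsFrom [] s = [] := by
  simp [diffsFrom, PySem.List.enumerate_nil]

lemma diffsFrom_cons' (i j : Char) (rest : List (Char × Char)) (s : Int) :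
    diffsFrom ((i, j) :: rest) s = (if i = j then [] else [s]) ++ diffsFrom rest (s + 1) := by
  by_cases h : i = j <;> simp [diffsFrom, PySem.List.enumerate_cons, h]

lemma diffsFrom_shift (pairs : List (Char × Char)) :
    ∀ s, diffsFrom pairs s = (diffsFrom pairs 0).map (· + s) := by
  induction pairs with
  | nil => intro s; simp [diffsFrom_nil]
  | cons p rest ih =>
    intro s
    obtain ⟨i, j⟩ := p
    rw [diffsFrom_cons' i j rest s, diffsFrom_cons' i j rest 0]
    simp only [zero_add]
    rw [ih (s + 1), ih 1, List.map_append, List.map_map]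
    congr 1
    · by_cases h : i = j <;> simp [h]
    · apply List.map_congr_left; intro x _; simp; ring

lemma diffsFrom_cons (i j : Char) (rest : List (Char × Char)) :
    diffsFrom ((i, j) :: rest) 0 =
      (if i = j then [] else [(0:Int)]) ++ (diffsFrom rest 0).map (· + 1) := by
  rw [diffsFrom_cons']
  simp only [zero_add]
  rw [diffsFrom_shift rest 1]

lemma lceG_eq_diffs (pairs : List (Char × Char)) :
    ∀ b : Int, lceG pairs b =
      (if max b 0 < ((diffsFrom pairs 0).length : Int)
        then PySem.List.pyGetD (diffsFrom pairs 0) (max b 0) 0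
        else (pairs.length : Int)) := by
  induction pairs with
  | nil =>
    intro b
    have h : ¬ max b 0 < ((diffsFrom ([] : List (Char × Char)) 0).length : Int) := by
      rw [diffsFrom_nil]; simp
    simp [lceG, diffsFrom_nil]
  | cons p rest ih =>
    intro b
    obtain ⟨i, j⟩ := p
    rw [diffsFrom_cons]
    by_cases h : i = j
    · -- match at position 0: every mismatch index shifts by one
      rw [if_pos h, List.nil_append]
      have hlen : (((diffsFrom rest 0).map (· + 1)).length : Int) = ((diffsFrom rest 0).length : Int) := by simp
      by_cases hk : max b 0 < ((diffsFrom rest 0).length : Int)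
      · have hget : PySem.List.pyGetD ((diffsFrom rest 0).map (· + 1)) (max b 0) 0 =
            PySem.List.pyGetD (diffsFrom rest 0) (max b 0) 0 + 1 := by
          rw [PySem.List.pyGetD_eq_getElem _ 0 (le_max_right b 0) (by rw [hlen]; exact hk),
              PySem.List.pyGetD_eq_getElem _ 0 (le_max_right b 0) hk]
          simp
        rw [if_pos (by rw [hlen]; exact hk), hget]
        simp only [lceG, if_pos h, ih b, if_pos hk]
        ring
      · rw [if_neg (by rw [hlen]; exact hk)]
        simp only [lceG, if_pos h, ih b, if_neg hk, List.length_cons]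
        push_cast
        ring
    · rw [if_neg h, List.singleton_append]
      by_cases hb : (0:Int) < b
      · have hmax : max b 0 = b := by omega
        have hmax' : max (b - 1) 0 = b - 1 := by omega
        by_cases hk : b - 1 < ((diffsFrom rest 0).length : Int)
        · have hget : PySem.List.pyGetD ((0:Int) :: (diffsFrom rest 0).map (· + 1)) b 0 =
              PySem.List.pyGetD (diffsFrom rest 0) (b - 1) 0 + 1 := by
            rw [PySem.List.pyGetD_eq_getElem _ 0 (by omega) (by simp; omega),
                PySem.List.pyGetD_eq_getElem _ 0 (by omega) (by omega)]
            have hb1 : b.toNat = (b - 1).toNat + 1 := by omega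
            simp only [hb1, List.getElem_cons_succ, List.getElem_map]
          rw [if_pos (by simp; omega), hmax, hget]
          simp only [lceG, if_neg h, if_pos hb, ih (b - 1), hmax']
          rw [if_pos (by omega)]
          ring
        · rw [if_neg (by simp; omega)]
          simp only [lceG, if_neg h, if_pos hb, ih (b - 1), hmax', List.length_cons]
          rw [if_neg (by omega)]
          push_cast
          ring
      · have hmax : max b 0 = 0 := by omega
        rw [hmax, if_pos (by simp)]
        simp [lceG, h, hb, PySem.List.pyGetD]

-- ===== VERDICT (by name: the statement is the Claim_ definition above) =====
theorem lce_spec : Claim_equal_lce := by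
  intro s1 i1 s2 i2 m _
  unfold Spec_lce lce lce_alt
  have h0 : m - 0 = m := by ring
  rw [lceLoop_eq_lceG, h0, lceG_eq_diffs]
  simp only [zero_add]
  unfold diffsFrom
  rw [List.length_zip]
  push_cast
  rfl
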